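-- pv_equiv track=rewrite | github.com/ishaanbuildsthings/leetcode | problems/Leetcode/3730. Maximum Calories Burnt from Jumps.py | maxCaloriesBurnt
-- ===== SOURCE A (Python) =====
-- from typing import List
--
-- def maxCaloriesBurnt(heights: List[int]) -> int:
--     heights.sort()
--     res = 0
--     n = len(heights)
--     prev = 0
--     for i in range(n):
--         if i % 2 == 0:
--             j = n - (i//2) - 1
--         else:
--             j = (i//2)
--         diff = abs(heights[j] - prev)
--         res += diff**2
--         prev = heights[j]
--
--     return res
-- ===== SOURCE B (Python) =====
-- def maxCaloriesBurnt(heights):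
--     # Algebraic closed form: expanding each (cur - prev)**2 along the zigzag
--     # (largest, smallest, 2nd largest, ...) order, every element's square appears
--     # twice except the final (middle) element's, and the cross terms are exactly
--     # the products of positionally opposite elements of the sorted list, so
--     # result = 2*sum(x^2) - sum(s[i]*s[n-1-i]) - sum(s[i]*s[n-2-i]).
--     heights.sort()
--     rev = heights[::-1]
--     return (2 * sum(x * x for x in heights)
--             - sum(a * b for a, b in zip(heights, rev))
--             - sum(a * b for a, b in zip(heights, rev[1:])))
-- ===== Notes on version B (the rewrite author's own statement) =====
-- stated objective: alternative
-- what changed: B replaces A's sequential zigzag walk (prev accumulator plus i%2 index formula) with an algebraic closed form: expanding the squared differences shows the result equals 2*sum(x^2) minus the two sums of products of positionally opposite elements of the sorted list, computed with zip over the reversed list, with no zigzag order and no running previous value.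
import Mathlib
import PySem

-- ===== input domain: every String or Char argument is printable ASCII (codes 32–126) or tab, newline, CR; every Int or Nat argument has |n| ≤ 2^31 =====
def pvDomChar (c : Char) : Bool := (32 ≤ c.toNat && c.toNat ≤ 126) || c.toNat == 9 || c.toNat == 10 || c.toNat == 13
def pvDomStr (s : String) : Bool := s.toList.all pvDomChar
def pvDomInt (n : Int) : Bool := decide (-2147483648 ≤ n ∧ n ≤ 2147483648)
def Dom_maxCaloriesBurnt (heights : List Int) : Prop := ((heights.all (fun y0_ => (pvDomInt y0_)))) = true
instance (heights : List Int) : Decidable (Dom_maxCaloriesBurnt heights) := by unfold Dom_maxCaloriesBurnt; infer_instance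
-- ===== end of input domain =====

-- B replaces A's sequential zigzag walk by an algebraic closed form over the sorted list
-- (objective: alternative algorithm, same O(n log n) cost).
-- Both A and B sort their argument in place; the equivalence proved here is about the return value.

-- ===== PORT A =====
def maxCaloriesBurnt (heights : List Int) : Int :=
  -- heights.sort(); loop over range(n) with the i%2 index formula, state (res, prev)
  let hs := PySem.List.sorted heights (fun x => x) false
  let n : Int := hs.length
  ((PySem.List.pyRange 0 n 1).foldl
    (fun (st : Int × Int) i =>
      let j : Int := if PySem.Int.mod i 2 = 0
        then n - PySem.Int.floordiv i 2 - 1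
        else PySem.Int.floordiv i 2
      let diff := |PySem.List.pyGetD hs j 0 - st.2|
      (st.1 + diff ^ 2, PySem.List.pyGetD hs j 0))
    (0, 0)).1

-- ===== PORT B =====
def maxCaloriesBurnt_alt (heights : List Int) : Int :=
  -- heights.sort(); rev = heights[::-1];
  -- 2*sum(x*x) - sum(a*b for zip(heights, rev)) - sum(a*b for zip(heights, rev[1:]))
  let hs := PySem.List.sorted heights (fun x => x) false
  let rev := hs.reverse
  2 * (hs.map (fun x => x * x)).sum
    - ((hs.zip rev).map (fun p => p.1 * p.2)).sum
    - ((hs.zip (rev.drop 1)).map (fun p => p.1 * p.2)).sum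

-- ===== PRECONDITION & SPEC =====
def Spec_maxCaloriesBurnt (heights : List Int) (out : Int) : Prop := out = maxCaloriesBurnt_alt heights
instance (heights : List Int) (out : Int) : Decidable (Spec_maxCaloriesBurnt heights out) := by unfold Spec_maxCaloriesBurnt; infer_instance

-- ===== CLAIM (what is proved, stated in full; the proofs are below) =====
def Claim_equal_maxCaloriesBurnt : Prop := ∀ (heights : List Int), Dom_maxCaloriesBurnt heights → Spec_maxCaloriesBurnt heights (maxCaloriesBurnt heights)

-- ===== LEMMAS AND PROOFS =====

-- proof-side middle ground: the zigzag sequence defined by recursion on the list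
def pvZig : List Int → List Int
  | [] => []
  | [x] => [x]
  | x :: y :: rest =>
      (x :: y :: rest).getLast (by simp) :: x :: pvZig ((y :: rest).dropLast)
termination_by xs => xs.length
decreasing_by simp

lemma pvZig_nil : pvZig [] = [] := by rw [pvZig.eq_def]
lemma pvZig_single (x : Int) : pvZig [x] = [x] := by rw [pvZig.eq_def]
lemma pvZig_two (a b : Int) (t : List Int) :
    pvZig (a :: b :: t) = (a :: b :: t).getLast (by simp) :: a :: pvZig ((b :: t).dropLast) := by
  rw [pvZig.eq_def]

lemma mid_get (x y : Int) (rest : List Int) (a b : Nat) (hab : a = b + 1)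
    (ha : a < (x :: y :: rest).length) (hb : b < ((y :: rest).dropLast).length) :
    (x :: y :: rest)[a] = ((y :: rest).dropLast)[b] := by
  subst hab
  rw [List.getElem_dropLast]
  simp

-- A's index formula enumerates exactly pvZig of the (sorted) list
lemma mapA_eq_zig (hs : List Int) :
    (PySem.List.pyRange 0 hs.length 1).map
      (fun i => PySem.List.pyGetD hs
        (if PySem.Int.mod i 2 = 0
          then (hs.length : Int) - PySem.Int.floordiv i 2 - 1
          else PySem.Int.floordiv i 2) 0)
    = pvZig hs := by
  induction hs using pvZig.induct with
  | case1 =>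
    norm_num [pvZig.eq_def, PySem.List.pyRange_one_eq_nil]
  | case2 x =>
    have h1 : (([x] : List Int).length : Int) = 1 := by simp
    have h2 : PySem.List.pyRange 0 1 1 = [0] := by
      have := PySem.List.pyRange_one_singleton (a := (0 : Int))
      norm_num at this
      exact this
    rw [h1, h2]
    norm_num [pvZig.eq_def, PySem.Int.mod, PySem.Int.floordiv, Int.zero_fmod, Int.zero_fdiv,
      PySem.List.pyGetD_zero_cons]
  | case3 x y rest ih =>
    have hlen : (((x :: y :: rest).length : Int)) = (rest.length : Int) + 2 := by
      push_cast [List.length_cons]; ring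
    rw [hlen]
    rw [PySem.List.pyRange_one_cons (by omega : (0:Int) < (rest.length : Int) + 2)]
    rw [PySem.List.pyRange_one_cons (by omega : (0:Int) + 1 < (rest.length : Int) + 2)]
    simp only [List.map_cons]
    rw [pvZig_two]
    congr 1
    · -- head: hs[n-1] is the last element
      rw [if_pos (by norm_num [PySem.Int.mod, Int.zero_fmod])]
      rw [show PySem.Int.floordiv 0 2 = 0 from by norm_num [PySem.Int.floordiv, Int.zero_fdiv]]
      rw [PySem.List.pyGetD_eq_getElem _ _ (by omega) (by simp; omega)]
      rw [List.getLast_eq_getElem]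
      congr 1
      simp; omega
    · congr 1
      · -- second: hs[0] is the first element
        rw [if_neg (by norm_num [PySem.Int.mod]; decide)]
        rw [show PySem.Int.floordiv (0 + 1) 2 = 0 from by norm_num [PySem.Int.floordiv]; decide]
        exact PySem.List.pyGetD_zero_cons x (y :: rest) 0
      · -- tail: shift the range by two and use the induction hypothesis
        rw [← ih]
        have hml : (((y :: rest).dropLast).length : Int) = (rest.length : Int) := by simp
        rw [hml]
        rw [PySem.List.pyRange_one, PySem.List.pyRange_one]
        rw [show ((rest.length : Int) + 2 - (0 + 1 + 1)).toNat = rest.length from by omega]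
        rw [show ((rest.length : Int) - 0).toNat = rest.length from by omega]
        rw [List.map_map, List.map_map]
        apply List.map_congr_left
        intro k hk
        simp only [List.mem_range] at hk
        simp only [Function.comp]
        rw [PySem.Int.mod_eq_emod_of_pos (by norm_num), PySem.Int.mod_eq_emod_of_pos (by norm_num),
            PySem.Int.floordiv_eq_ediv_of_pos (by norm_num), PySem.Int.floordiv_eq_ediv_of_pos (by norm_num)]
        split_ifs with h1 h2 h2
        · rw [PySem.List.pyGetD_eq_getElem _ _ (by omega) (by simp; omega),
              PySem.List.pyGetD_eq_getElem _ _ (by omega) (by simp; omega)]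
          apply mid_get
          omega
        · omega
        · omega
        · rw [PySem.List.pyGetD_eq_getElem _ _ (by omega) (by simp; omega),
              PySem.List.pyGetD_eq_getElem _ _ (by omega) (by simp; omega)]
          apply mid_get
          omega

-- proof-side names for the fold (A's walk) and the closed form (B's formula) on a raw list
def pvStep (st : Int × Int) (cur : Int) : Int × Int := (st.1 + (cur - st.2) ^ 2, cur)

def pvF (t : List Int) (p : Int) : Int := (t.foldl pvStep (0, p)).1

def pvE (l : List Int) : Int :=
  2 * (l.map (fun x => x * x)).sum
    - ((l.zip l.reverse).map (fun p => p.1 * p.2)).sum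
    - ((l.zip (l.reverse.drop 1)).map (fun p => p.1 * p.2)).sum

lemma pvF_add (t : List Int) : ∀ (r p : Int), (t.foldl pvStep (r, p)).1 = r + pvF t p := by
  induction t with
  | nil => intro r p; simp [pvF]
  | cons c t ih =>
    intro r p
    simp only [List.foldl_cons, pvStep]
    rw [ih]
    have h2 : pvF (c :: t) p = (c - p) ^ 2 + pvF t c := by
      simp only [pvF, List.foldl_cons, pvStep]
      rw [ih, ih]
      ring
    rw [h2]
    ring

lemma pvF_cons (c : Int) (t : List Int) (p : Int) :
    pvF (c :: t) p = (c - p) ^ 2 + pvF t c := by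
  simp only [pvF, List.foldl_cons, pvStep]
  rw [pvF_add, pvF_add]
  ring

-- the algebraic recursion of the closed form: peel the first and last elements
lemma pvE_step (m : List Int) (x z : Int) :
    pvE (x :: m ++ [z]) =
      z ^ 2 + (x - z) ^ 2 + pvE m + (if m = [] then 0 else x ^ 2 - 2 * x * m.getLastD 0) := by
  rcases m.eq_nil_or_concat with rfl | ⟨m', w, rfl⟩
  · simp only [pvE]
    norm_num [List.zip_cons_cons]
    ring
  · rw [List.concat_eq_append]
    have h1 : (x :: ((m' ++ [w]) ++ [z])).reverse = z :: ((w :: m'.reverse) ++ [x]) := by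
      simp
    have hlen : (m' ++ [w]).length = (w :: m'.reverse).length := by simp
    have hlen' : m'.length = m'.reverse.length := by simp
    have hz1 : ((m' ++ [w]) ++ [z]).zip ((w :: m'.reverse) ++ [x])
        = ((m' ++ [w]).zip ((m' ++ [w]).reverse)) ++ [(z, x)] := by
      rw [List.zip_append hlen]
      simp
    have hz2 : ((m' ++ [w]) ++ [z]).zip (m'.reverse ++ [x])
        = (m'.zip m'.reverse) ++ [(w, x)] := by
      rw [List.append_assoc, List.zip_append hlen']
      simp
    have hz3 : (m' ++ [w]).zip ((m' ++ [w]).reverse.drop 1) = m'.zip m'.reverse := by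
      rw [show (m' ++ [w]).reverse.drop 1 = m'.reverse ++ ([] : List Int) from by simp,
          List.zip_append hlen']
      simp
    simp only [pvE]
    rw [show (x :: (m' ++ [w]) ++ [z]) = (x :: ((m' ++ [w]) ++ [z])) from rfl, h1]
    rw [show (z :: ((w :: m'.reverse) ++ [x])).drop 1 = (w :: (m'.reverse ++ [x])) from by simp]
    rw [show (z :: ((w :: m'.reverse) ++ [x])) = (z :: ((w :: m'.reverse) ++ [x])) from rfl]
    simp only [List.zip_cons_cons, hz2]
    rw [hz1, hz3]
    rw [if_neg (by simp : ¬ (m' ++ [w] = []))]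
    simp only [List.map_cons, List.map_append, List.sum_cons, List.sum_append, List.map_nil,
      List.sum_nil, List.getLastD_concat]
    ring

-- main: the fold over the zigzag order equals the closed form (any list, any start)
lemma pvF_zig (l : List Int) : ∀ p : Int,
    pvF (pvZig l) p = pvE l + (if l = [] then 0 else p ^ 2 - 2 * p * l.getLastD 0) := by
  induction l using pvZig.induct with
  | case1 => intro p; simp [pvZig_nil, pvF, pvE]
  | case2 x =>
    intro p
    rw [pvZig_single, pvF_cons]
    simp only [pvF, List.foldl_nil]
    simp [pvE]
    ring
  | case3 x y rest ih =>
    intro p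
    have hne : (y :: rest) ≠ [] := by simp
    have hdec : (y :: rest).dropLast ++ [(y :: rest).getLast hne] = y :: rest :=
      List.dropLast_append_getLast hne
    rw [pvZig_two, pvF_cons, pvF_cons, ih]
    have hgl : (x :: y :: rest).getLast (by simp) = (y :: rest).getLast hne :=
      List.getLast_cons hne
    rw [hgl]
    have hE : pvE (x :: y :: rest)
        = ((y :: rest).getLast hne) ^ 2 + (x - (y :: rest).getLast hne) ^ 2
          + pvE ((y :: rest).dropLast)
          + (if (y :: rest).dropLast = [] then 0
             else x ^ 2 - 2 * x * ((y :: rest).dropLast).getLastD 0) := by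
      conv_lhs => rw [show (x :: y :: rest)
          = x :: ((y :: rest).dropLast ++ [(y :: rest).getLast hne]) from by rw [hdec]]
      exact pvE_step _ _ _
    rw [hE]
    have hgld : (x :: y :: rest).getLastD 0 = (y :: rest).getLast hne := by
      conv_lhs => rw [show x :: y :: rest
          = (x :: (y :: rest).dropLast) ++ [(y :: rest).getLast hne] from by
            rw [List.cons_append, hdec]]
      exact List.getLastD_concat
    rw [if_neg (by simp : ¬ (x :: y :: rest) = []), hgld]
    ring

-- ===== VERDICT (by name: the statement is the Claim_ definition above) =====
theorem maxCaloriesBurnt_spec : Claim_equal_maxCaloriesBurnt := by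
  intro heights _
  unfold Spec_maxCaloriesBurnt maxCaloriesBurnt maxCaloriesBurnt_alt
  simp only []
  set hs := PySem.List.sorted heights (fun x => x) false with hhs
  have hstep : (fun (st : Int × Int) (i : Int) =>
      let j : Int := if PySem.Int.mod i 2 = 0
        then (hs.length : Int) - PySem.Int.floordiv i 2 - 1
        else PySem.Int.floordiv i 2
      let diff := |PySem.List.pyGetD hs j 0 - st.2|
      (st.1 + diff ^ 2, PySem.List.pyGetD hs j 0))
      = fun (st : Int × Int) (i : Int) =>
        pvStep st (PySem.List.pyGetD hs
            (if PySem.Int.mod i 2 = 0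
              then (hs.length : Int) - PySem.Int.floordiv i 2 - 1
              else PySem.Int.floordiv i 2) 0) := by
    funext st i
    simp only [pvStep]
    rw [sq_abs]
  rw [hstep, ← List.foldl_map, mapA_eq_zig]
  have hz := pvF_zig hs 0
  simp only [pvF] at hz
  rw [hz]
  simp [pvE]
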